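-- pv_equiv track=rewrite | github.com/Karthik-works26/DS-algo | day3/q14.py | count_with_given_xor
-- ===== SOURCE A (Python) =====
-- from collections import defaultdict
--
-- def count_with_given_xor(arr,k):
--     hashmap = defaultdict(int)
--     count = 0
--     for i in range(len(arr)):
--         for j in range(i,len(arr)):
--             if arr[i]^arr[j] == k:
--                 count = count + 1
--     return count
-- ===== SOURCE B (Python) =====
-- def count_with_given_xor(arr, k):
--     # one pass: for each element, pairs ending here = occurrences of x^k seen so far,
--     # plus the diagonal pair (i,i) when k == 0
--     seen = {}
--     diag = 1 if k == 0 else 0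
--     count = 0
--     for x in arr:
--         count += seen.get(x ^ k, 0) + diag
--         seen[x] = seen.get(x, 0) + 1
--     return count
-- ===== Notes on version B (the rewrite author's own statement) =====
-- stated objective: faster
-- what changed: replaced the O(n^2) double scan over index pairs by a single left-to-right pass with a frequency dictionary: each element contributes the number of previously seen values equal to x^k, plus 1 for the diagonal pair when k==0
import Mathlib
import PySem

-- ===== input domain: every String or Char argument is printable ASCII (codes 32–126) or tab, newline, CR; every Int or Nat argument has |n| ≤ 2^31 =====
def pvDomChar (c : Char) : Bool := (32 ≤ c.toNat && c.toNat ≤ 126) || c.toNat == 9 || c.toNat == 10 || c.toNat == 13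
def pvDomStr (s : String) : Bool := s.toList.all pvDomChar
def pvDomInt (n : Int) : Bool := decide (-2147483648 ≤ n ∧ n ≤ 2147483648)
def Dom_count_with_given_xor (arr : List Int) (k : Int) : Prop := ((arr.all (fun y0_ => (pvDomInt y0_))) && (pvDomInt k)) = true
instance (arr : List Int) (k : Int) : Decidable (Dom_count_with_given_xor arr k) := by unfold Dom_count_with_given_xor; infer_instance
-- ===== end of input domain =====

-- B replaces A's O(n^2) double index scan by one pass with a frequency dictionary (return value only; neither mutates its arguments).

-- ===== PORT A =====
def count_with_given_xor (arr : List Int) (k : Int) : Int :=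
  -- hashmap = defaultdict(int) is created but never used in A; count = 0; double loop over index pairs
  (PySem.List.pyRange 0 (arr.length : Int) 1).foldl (fun count i =>
    (PySem.List.pyRange i (arr.length : Int) 1).foldl (fun count j =>
      if PySem.Int.bxor (PySem.List.pyGetD arr i 0) (PySem.List.pyGetD arr j 0) = k
      then count + 1 else count) count) 0

-- ===== PORT B =====
def count_with_given_xor_alt (arr : List Int) (k : Int) : Int :=
  -- diag = 1 if k == 0 else 0, inlined at its use site
  (arr.foldl (fun st x =>
      (st.1.modify x 0 (· + 1), st.2 + st.1.getD (PySem.Int.bxor x k) 0 + (if k = 0 then 1 else 0)))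
    ((PySem.Dict.empty : PySem.Dict Int Int), (0 : Int))).2

-- ===== PRECONDITION & SPEC =====
def Spec_count_with_given_xor (arr : List Int) (k : Int) (out : Int) : Prop := out = count_with_given_xor_alt arr k
instance (arr : List Int) (k : Int) (out : Int) : Decidable (Spec_count_with_given_xor arr k out) := by unfold Spec_count_with_given_xor; infer_instance

-- ===== CLAIM (what is proved, stated in full; the proofs are below) =====
def Claim_equal_count_with_given_xor : Prop := ∀ (arr : List Int) (k : Int), Dom_count_with_given_xor arr k → Spec_count_with_given_xor arr k (count_with_given_xor arr k)

-- ===== LEMMAS AND PROOFS =====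

theorem bxor_cancel (x k : Int) : PySem.Int.bxor x (PySem.Int.bxor x k) = k := by
  rcases le_or_gt (0:Int) x with hx | hx <;> rcases le_or_gt (0:Int) k with hk | hk
  · have hB : PySem.Int.bxor x k = ((x.toNat ^^^ k.toNat : Nat) : Int) := by
      simp only [PySem.Int.bxor]; rw [if_pos hx, if_pos hk]
    rw [hB]; simp only [PySem.Int.bxor]
    rw [if_pos hx, if_pos (by positivity)]
    simp only [Int.toNat_natCast, ← Nat.xor_assoc, Nat.xor_self, Nat.zero_xor]
    omega
  · have hB : PySem.Int.bxor x k = -((x.toNat ^^^ (-k-1).toNat : Nat) : Int) - 1 := by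
      simp only [PySem.Int.bxor]; rw [if_pos hx, if_neg (by omega)]
    rw [hB]; simp only [PySem.Int.bxor]
    rw [if_pos hx, if_neg (by omega)]
    have h2 : (-(-((x.toNat ^^^ (-k-1).toNat : Nat) : Int) - 1) - 1).toNat = x.toNat ^^^ (-k-1).toNat := by omega
    rw [h2]
    simp only [← Nat.xor_assoc, Nat.xor_self, Nat.zero_xor]
    omega
  · have hB : PySem.Int.bxor x k = -(((-x-1).toNat ^^^ k.toNat : Nat) : Int) - 1 := by
      simp only [PySem.Int.bxor]; rw [if_neg (by omega), if_pos hk]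
    rw [hB]; simp only [PySem.Int.bxor]
    rw [if_neg (by omega), if_neg (by omega)]
    have h2 : (-(-(((-x-1).toNat ^^^ k.toNat : Nat) : Int) - 1) - 1).toNat = (-x-1).toNat ^^^ k.toNat := by omega
    rw [h2]
    simp only [← Nat.xor_assoc, Nat.xor_self, Nat.zero_xor]
    omega
  · have hB : PySem.Int.bxor x k = (((-x-1).toNat ^^^ (-k-1).toNat : Nat) : Int) := by
      simp only [PySem.Int.bxor]; rw [if_neg (by omega), if_neg (by omega)]
    rw [hB]; simp only [PySem.Int.bxor]
    rw [if_neg (by omega), if_pos (by positivity)]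
    simp only [Int.toNat_natCast, ← Nat.xor_assoc, Nat.xor_self, Nat.zero_xor]
    omega

theorem bxor_self_eq (x : Int) : PySem.Int.bxor x x = 0 := PySem.Int.bxor_self x

theorem bxor_cancel2 (x k : Int) : PySem.Int.bxor (PySem.Int.bxor x k) x = k := by
  rw [PySem.Int.bxor_comm]; exact bxor_cancel x k

theorem bxor_eq_iff (z x k : Int) : PySem.Int.bxor z x = k ↔ z = PySem.Int.bxor x k := by
  constructor
  · intro h; subst h
    rw [PySem.Int.bxor_comm z x, bxor_cancel]
  · intro h; subst h
    rw [PySem.Int.bxor_comm, bxor_cancel]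

-- reference count: pvF k arr = number of pairs i ≤ j with arr[i] xor arr[j] = k, recursing on the head
def pvF (k : Int) : List Int → Int
  | [] => 0
  | x :: xs => (if k = 0 then 1 else 0) + ((xs.countP (fun y => PySem.Int.bxor x y == k) : Nat) : Int) + pvF k xs

theorem A_outer (arr : List Int) (k : Int) (n : Nat) :
    ∀ (a : Int) (c : Int), 0 ≤ a → (arr.length : Int) - a ≤ n →
    (PySem.List.pyRange a (arr.length : Int) 1).foldl (fun count i =>
      (PySem.List.pyRange i (arr.length : Int) 1).foldl (fun count j =>
        if PySem.Int.bxor (PySem.List.pyGetD arr i 0) (PySem.List.pyGetD arr j 0) = k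
        then count + 1 else count) count) c
    = c + pvF k (arr.drop a.toNat) := by
  induction n with
  | zero =>
    intro a c ha hn
    have hge : (arr.length : Int) ≤ a := by omega
    rw [PySem.List.pyRange_one_eq_nil hge]
    have : arr.drop a.toNat = [] := by
      apply List.drop_eq_nil_of_le; omega
    simp [this, pvF]
  | succ m ih =>
    intro a c ha hn
    by_cases hlt : a < (arr.length : Int)
    · rw [PySem.List.pyRange_one_cons hlt, List.foldl_cons]
      have hdropcons : arr.drop a.toNat = arr[a.toNat]'(by omega) :: arr.drop (a.toNat + 1) := by
        exact List.drop_eq_getElem_cons (by omega)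
      have hinner :
          (PySem.List.pyRange a (arr.length : Int) 1).foldl (fun count j =>
            if PySem.Int.bxor (PySem.List.pyGetD arr a 0) (PySem.List.pyGetD arr j 0) = k
            then count + 1 else count) c
          = c + (((arr.drop a.toNat).countP
              (fun y => PySem.Int.bxor (PySem.List.pyGetD arr a 0) y == k) : Nat) : Int) := by
        rw [PySem.List.foldl_pyRange_pyGetD' arr 0 (fun count y => if PySem.Int.bxor (PySem.List.pyGetD arr a 0) y = k then count + 1 else count) c ha]
        rw [PySem.List.foldl_ite_add_one]
        congr 2
      rw [hinner]
      rw [ih (a + 1) _ (by omega) (by omega)]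
      have hget : PySem.List.pyGetD arr a 0 = arr[a.toNat]'(by omega) :=
        PySem.List.pyGetD_eq_getElem arr 0 ha hlt
      have hnext : (a + 1).toNat = a.toNat + 1 := by omega
      rw [hnext, hdropcons, pvF]
      simp only [hget, List.countP_cons, bxor_self_eq]
      by_cases hk : k = 0
      · subst hk
        simp
        ring
      · have h0 : ¬ ((0:Int) = k) := fun h => hk h.symm
        simp [hk, h0]
        ring
    · have hge : (arr.length : Int) ≤ a := by omega
      rw [PySem.List.pyRange_one_eq_nil hge]
      have : arr.drop a.toNat = [] := by
        apply List.drop_eq_nil_of_le; omega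
      simp [this, pvF]

theorem A_eq_pvF (arr : List Int) (k : Int) : count_with_given_xor arr k = pvF k arr := by
  unfold count_with_given_xor
  have := A_outer arr k arr.length 0 0 (by omega) (by omega)
  simpa using this

-- first component of B's fold is the frequency counter of the processed prefix
theorem B_fst (k : Int) (diag : Int) (l : List Int) :
    ∀ (d : PySem.Dict Int Int) (c : Int),
    (l.foldl (fun st x => (st.1.modify x 0 (· + 1), st.2 + st.1.getD (PySem.Int.bxor x k) 0 + diag)) (d, c)).1
    = l.foldl (fun d x => d.modify x 0 (· + 1)) d := by
  induction l with
  | nil => intro d c; rfl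
  | cons x xs ih => intro d c; simp only [List.foldl_cons]; exact ih _ _

theorem B_snoc (arr : List Int) (x k : Int) :
    count_with_given_xor_alt (arr ++ [x]) k
    = count_with_given_xor_alt arr k + (if k = 0 then 1 else 0)
      + ((arr.count (PySem.Int.bxor x k) : Nat) : Int) := by
  unfold count_with_given_xor_alt
  rw [List.foldl_append]
  simp only [List.foldl_cons, List.foldl_nil]
  rw [B_fst]
  have hcnt : (arr.foldl (fun d x => d.modify x 0 (· + 1)) (PySem.Dict.empty : PySem.Dict Int Int)).getD (PySem.Int.bxor x k) 0
      = ((arr.count (PySem.Int.bxor x k) : Nat) : Int) := by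
    rw [← PySem.Dict.counter_eq_foldl, PySem.Dict.getD_counter]
  rw [hcnt]
  ring

theorem pvF_snoc (k x : Int) (l : List Int) :
    pvF k (l ++ [x]) = pvF k l + (if k = 0 then 1 else 0) + ((l.count (PySem.Int.bxor x k) : Nat) : Int) := by
  induction l with
  | nil =>
    simp [pvF]
  | cons z zs ih =>
    simp only [List.cons_append, pvF, ih, List.countP_append, List.count_cons]
    have hbeq : (PySem.Int.bxor z x == k) = (z == PySem.Int.bxor x k) := by
      by_cases h2 : z = PySem.Int.bxor x k
      · subst h2
        simp [bxor_cancel2]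
      · have h : ¬ PySem.Int.bxor z x = k := fun hh => h2 ((bxor_eq_iff z x k).mp hh)
        simp [h, h2]
    simp only [List.countP_cons, List.countP_nil, hbeq]
    by_cases hz : z = PySem.Int.bxor x k <;> simp [hz] <;> ring

theorem B_eq_pvF (arr : List Int) (k : Int) : count_with_given_xor_alt arr k = pvF k arr := by
  induction arr using List.reverseRecOn with
  | nil => rfl
  | append_singleton xs x ih =>
    rw [B_snoc, pvF_snoc, ih]

-- ===== VERDICT (by name: the statement is the Claim_ definition above) =====
theorem count_with_given_xor_spec : Claim_equal_count_with_given_xor := by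
  intro arr k _
  unfold Spec_count_with_given_xor
  rw [A_eq_pvF, B_eq_pvF]
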